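-- pv_equiv track=rewrite | github.com/birdrat-lab/birdrat-proplogic | src/birdrat_proplogic/quality.py | channel_counts
-- ===== SOURCE A (Python) =====
-- def channel_counts(population_size: int) -> tuple[int, int, int, int, int]:
--     if population_size <= 0:
--         return (0, 0, 0, 0, 0)
--     base = population_size // 5
--     counts = [base, base, base, base, base]
--     for index in range(population_size - sum(counts)):
--         counts[index] += 1
--     return tuple(counts)  # type: ignore[return-value]
-- ===== SOURCE B (Python) =====
-- def channel_counts(population_size: int) -> tuple[int, int, int, int, int]:
--     if population_size <= 0:
--         return (0, 0, 0, 0, 0)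
--     counts = []
--     remaining = population_size
--     for slots in range(5, 0, -1):
--         share = -(-remaining // slots)  # ceil division: fair share for this channel
--         counts.append(share)
--         remaining -= share
--     return tuple(counts)
-- ===== Notes on version B (the rewrite author's own statement) =====
-- stated objective: alternative
-- what changed: Replaces A's up-front base quotient plus extra-incrementing loop with a greedy sequential quota: each channel takes the ceiling of remaining/slots_left and the remainder is carried forward, so the whole population is never divided by the channel count up front.
import Mathlib
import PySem

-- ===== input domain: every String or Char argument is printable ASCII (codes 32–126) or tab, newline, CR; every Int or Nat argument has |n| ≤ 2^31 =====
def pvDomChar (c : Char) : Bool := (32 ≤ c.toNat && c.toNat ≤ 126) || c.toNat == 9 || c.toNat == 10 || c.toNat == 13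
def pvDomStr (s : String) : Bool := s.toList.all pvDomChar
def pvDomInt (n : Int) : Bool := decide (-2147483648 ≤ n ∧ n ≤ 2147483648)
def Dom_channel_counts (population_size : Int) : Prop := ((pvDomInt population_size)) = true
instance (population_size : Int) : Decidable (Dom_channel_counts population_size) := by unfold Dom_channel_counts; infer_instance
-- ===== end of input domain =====

-- B replaces A's base = n // 5 plus extra-incrementing loop with a greedy sequential quota
-- (each channel takes ceil(remaining / slots_left)); alternative decomposition, same cost.

-- ===== PORT A =====
def channel_counts (population_size : Int) : Int × Int × Int × Int × Int :=
  if population_size ≤ 0 then (0, 0, 0, 0, 0)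
  else
    let base := PySem.Int.floordiv population_size 5
    let counts : List Int := [base, base, base, base, base]
    let counts := (PySem.List.pyRange 0 (population_size - counts.sum) 1).foldl
      (fun cs index => cs.modify index.toNat (fun x => x + 1)) counts
    match counts with
    | [a, b, c, d, e] => (a, b, c, d, e)
    | _ => (0, 0, 0, 0, 0)

-- ===== PORT B =====
-- B-side helper: Python's tuple(counts) on the built 5-element list
def pvTuple5 (l : List Int) : Int × Int × Int × Int × Int :=
  (l.getD 0 0, l.getD 1 0, l.getD 2 0, l.getD 3 0, l.getD 4 0)

def channel_counts_alt (population_size : Int) : Int × Int × Int × Int × Int :=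
  if population_size ≤ 0 then (0, 0, 0, 0, 0)
  else
    let st := (PySem.List.pyRange 5 0 (-1)).foldl
      (fun (st : List Int × Int) slots =>
        let share := -(PySem.Int.floordiv (-st.2) slots)  -- -(-remaining // slots) = ceil division
        (st.1 ++ [share], st.2 - share))
      (([] : List Int), population_size)
    pvTuple5 st.1

-- ===== PRECONDITION & SPEC =====
def Spec_channel_counts (population_size : Int) (out : Int × Int × Int × Int × Int) : Prop := out = channel_counts_alt population_size
instance (population_size : Int) (out : Int × Int × Int × Int × Int) : Decidable (Spec_channel_counts population_size out) := by unfold Spec_channel_counts; infer_instance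

-- ===== CLAIM (what is proved, stated in full; the proofs are below) =====
def Claim_equal_channel_counts : Prop := ∀ (population_size : Int), Dom_channel_counts population_size → Spec_channel_counts population_size (channel_counts population_size)

-- ===== LEMMAS AND PROOFS =====
theorem channel_counts_eq_alt (n : Int) : channel_counts n = channel_counts_alt n := by
  unfold channel_counts channel_counts_alt
  by_cases h : n ≤ 0
  · simp [h]
  · simp only [h, if_false]
    have h5 : (0 : Int) < 5 := by norm_num
    simp only [PySem.Int.floordiv_eq_ediv_of_pos h5]
    have hsum : n - ([n / 5, n / 5, n / 5, n / 5, n / 5] : List Int).sum = n % 5 := by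
      simp [List.sum_cons]; omega
    rw [hsum]
    have hr : n % 5 = 0 ∨ n % 5 = 1 ∨ n % 5 = 2 ∨ n % 5 = 3 ∨ n % 5 = 4 := by omega
    rcases hr with hr | hr | hr | hr | hr <;>
      rw [hr] <;>
      simp [PySem.List.pyRange, List.range_succ, List.foldl, pvTuple5,
        PySem.Int.floordiv_eq_ediv_of_pos] <;>
      refine ⟨?_, ?_, ?_, ?_, ?_⟩ <;> omega

-- ===== VERDICT (by name: the statement is the Claim_ definition above) =====
theorem channel_counts_spec : Claim_equal_channel_counts := by
  intro n _
  exact channel_counts_eq_alt n
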